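-- pv_equiv track=rewrite | github.com/ben-hutchinson/pokeleximon | services/api/app/services/cryptic_runtime.py | _deletion_derives_answer
-- ===== SOURCE A (Python) =====
-- from collections import Counter
--
-- def _deletion_derives_answer(fodder: str, remove: str, answer_key: str) -> bool:
--     if not remove:
--         return False
--     remaining = Counter(fodder)
--     removed = Counter(remove)
--     for char, count in removed.items():
--         if remaining[char] < count:
--             return False
--         remaining[char] -= count
--     rebuilt = Counter({char: count for char, count in remaining.items() if count > 0})
--     return rebuilt == Counter(answer_key)
-- ===== SOURCE B (Python) =====
-- def _deletion_derives_answer(fodder: str, remove: str, answer_key: str) -> bool: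
--     if not remove:
--         return False
--     return sorted(fodder) == sorted(remove + answer_key)
-- ===== Notes on version B (the rewrite author's own statement) =====
-- stated objective: simpler
-- what changed: No Counter, no loop, no subtraction: B sorts fodder and sorts remove+answer_key and compares the two sorted lists, using the fact that deletion derives the answer iff fodder is a permutation of remove+answer_key.
import Mathlib
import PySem

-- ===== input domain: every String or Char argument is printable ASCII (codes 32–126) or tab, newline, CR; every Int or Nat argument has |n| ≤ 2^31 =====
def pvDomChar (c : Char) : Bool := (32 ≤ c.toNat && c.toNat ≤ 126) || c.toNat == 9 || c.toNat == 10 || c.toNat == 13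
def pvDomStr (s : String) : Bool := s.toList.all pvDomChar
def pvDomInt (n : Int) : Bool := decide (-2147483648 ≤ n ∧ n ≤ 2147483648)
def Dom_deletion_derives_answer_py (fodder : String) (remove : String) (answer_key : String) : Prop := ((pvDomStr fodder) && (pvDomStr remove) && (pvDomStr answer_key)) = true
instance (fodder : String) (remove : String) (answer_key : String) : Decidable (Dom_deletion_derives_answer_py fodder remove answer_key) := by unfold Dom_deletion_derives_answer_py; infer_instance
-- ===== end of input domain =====

-- B replaces A's Counter bookkeeping (decrement loop, subset guard, positive-count
-- rebuild) by sorting: deletion derives the answer iff sorted(fodder) equals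
-- sorted(remove + answer_key) (objective: simpler).

-- ===== PORT A =====
-- Python's `Counter == Counter` / dict `==` ignores insertion order: compare key-wise
-- via getD. Exact here because both compared dicts hold only nonzero values.
def pvCounterEq (d1 d2 : PySem.Dict Char Int) : Bool :=
  d1.items.all (fun p => d2.getD p.1 0 == p.2) && d2.items.all (fun p => d1.getD p.1 0 == p.2)

-- the `for char, count in removed.items()` loop with its early `return False`
def pvLoopA (rem : PySem.Dict Char Int) : List (Char × Int) → Option (PySem.Dict Char Int)
  | [] => some rem
  | (c, n) :: rest =>
    if rem.getD c 0 < n then none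
    else pvLoopA (rem.insert c (rem.getD c 0 - n)) rest

def deletion_derives_answer_py (fodder : String) (remove : String) (answer_key : String) : Bool :=
  if remove.toList = [] then false
  else
    match pvLoopA (PySem.Dict.counter fodder.toList) (PySem.Dict.counter remove.toList).items with
    | none => false
    | some remaining' =>
      pvCounterEq (PySem.Dict.ofList (remaining'.items.filter (fun p => decide (0 < p.2))))
        (PySem.Dict.counter answer_key.toList)

-- ===== PORT B =====
def deletion_derives_answer_py_alt (fodder : String) (remove : String) (answer_key : String) : Bool :=
  if remove.toList = [] then false
  else
    PySem.List.sorted fodder.toList (fun x => x) false ==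
      PySem.List.sorted (remove.toList ++ answer_key.toList) (fun x => x) false

-- ===== PRECONDITION & SPEC =====
def Spec_deletion_derives_answer_py (fodder : String) (remove : String) (answer_key : String) (out : Bool) : Prop := out = deletion_derives_answer_py_alt fodder remove answer_key
instance (fodder : String) (remove : String) (answer_key : String) (out : Bool) : Decidable (Spec_deletion_derives_answer_py fodder remove answer_key out) := by unfold Spec_deletion_derives_answer_py; infer_instance

-- ===== CLAIM (what is proved, stated in full; the proofs are below) =====
def Claim_equal_deletion_derives_answer_py : Prop := ∀ (fodder : String) (remove : String) (answer_key : String), Dom_deletion_derives_answer_py fodder remove answer_key → Spec_deletion_derives_answer_py fodder remove answer_key (deletion_derives_answer_py fodder remove answer_key)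

-- ===== LEMMAS AND PROOFS =====

theorem filter_beq_of_nodup (l : List Char) (h : l.Nodup) (x : Char) :
    l.filter (fun y => y == x) = if x ∈ l then [x] else [] := by
  induction l with
  | nil => simp
  | cons a t ih =>
    simp only [List.nodup_cons] at h
    by_cases hax : a = x
    · subst hax
      simp [h.1, ih h.2]
    · simp only [List.filter_cons, List.mem_cons]
      rw [ih h.2]
      simp [hax, Ne.symm hax]

theorem loop_none_iff (l : List (Char × Int)) (rem : PySem.Dict Char Int)
    (h : (l.map Prod.fst).Nodup) :
    pvLoopA rem l = none ↔ ∃ p ∈ l, rem.getD p.1 0 < p.2 := by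
  induction l generalizing rem with
  | nil => simp [pvLoopA]
  | cons p t ih =>
    obtain ⟨c, n⟩ := p
    simp only [List.map_cons, List.nodup_cons] at h
    by_cases hlt : rem.getD c 0 < n
    · simp only [pvLoopA, if_pos hlt, true_iff]
      exact ⟨(c, n), List.mem_cons_self, hlt⟩
    · rw [pvLoopA]
      simp only [if_neg hlt, List.mem_cons]
      rw [ih _ h.2]
      constructor
      · rintro ⟨q, hq, hlt'⟩
        refine ⟨q, Or.inr hq, ?_⟩
        rwa [PySem.Dict.getD_insert_of_ne _ _ _ (by
          intro he; exact h.1 (he ▸ List.mem_map_of_mem hq))] at hlt'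
      · rintro ⟨q, hq | hq, hlt'⟩
        · subst hq; exact absurd hlt' hlt
        · refine ⟨q, hq, ?_⟩
          rwa [PySem.Dict.getD_insert_of_ne _ _ _ (by
            intro he; exact h.1 (he ▸ List.mem_map_of_mem hq))]

theorem loop_some_getD (l : List (Char × Int)) (rem d : PySem.Dict Char Int)
    (h : (l.map Prod.fst).Nodup) (hs : pvLoopA rem l = some d) (x : Char) :
    d.getD x 0 = rem.getD x 0 - ((l.filter (fun p => p.1 == x)).map Prod.snd).sum := by
  induction l generalizing rem with
  | nil => simp [pvLoopA] at hs; simp [hs]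
  | cons p t ih =>
    obtain ⟨c, n⟩ := p
    simp only [List.map_cons, List.nodup_cons] at h
    rw [pvLoopA] at hs
    by_cases hlt : rem.getD c 0 < n
    · simp [hlt] at hs
    · rw [if_neg hlt] at hs
      have hrec := ih _ h.2 hs
      by_cases hcx : c = x
      · subst hcx
        have ht : t.filter (fun p => p.1 == c) = [] := by
          rw [List.filter_eq_nil_iff]
          intro q hq hbe
          exact h.1 ((beq_iff_eq.mp hbe) ▸ List.mem_map_of_mem hq)
        rw [hrec, PySem.Dict.getD_insert_self, List.filter_cons, ht]
        simp
      · rw [hrec, PySem.Dict.getD_insert_of_ne _ _ _ (Ne.symm hcx), List.filter_cons]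
        simp [hcx]

theorem loop_some_mem_keys (l : List (Char × Int)) (rem d : PySem.Dict Char Int)
    (hs : pvLoopA rem l = some d) (x : Char) :
    x ∈ d.keys ↔ x ∈ rem.keys ∨ x ∈ l.map Prod.fst := by
  induction l generalizing rem with
  | nil => simp [pvLoopA] at hs; simp [hs]
  | cons p t ih =>
    obtain ⟨c, n⟩ := p
    rw [pvLoopA] at hs
    by_cases hlt : rem.getD c 0 < n
    · simp [hlt] at hs
    · rw [if_neg hlt] at hs
      rw [ih _ hs, PySem.Dict.mem_keys_insert]
      simp only [List.map_cons, List.mem_cons]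
      tauto

theorem loop_some_nodup (l : List (Char × Int)) (rem d : PySem.Dict Char Int)
    (hs : pvLoopA rem l = some d) (h : rem.keys.Nodup) : d.keys.Nodup := by
  induction l generalizing rem with
  | nil => simp [pvLoopA] at hs; rwa [← hs]
  | cons p t ih =>
    obtain ⟨c, n⟩ := p
    rw [pvLoopA] at hs
    by_cases hlt : rem.getD c 0 < n
    · simp [hlt] at hs
    · rw [if_neg hlt] at hs
      exact ih _ hs (PySem.Dict.nodup_keys_insert _ _ _ h)

-- B = true  iff  remove ≠ "" and the counts add up everywhere
theorem alt_true_iff (fodder remove answer_key : String) :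
    deletion_derives_answer_py_alt fodder remove answer_key = true ↔
      (remove.toList ≠ [] ∧ ∀ c : Char,
        (fodder.toList.count c : Int) = remove.toList.count c + answer_key.toList.count c) := by
  unfold deletion_derives_answer_py_alt
  by_cases hr : remove.toList = []
  · simp [hr]
  · rw [if_neg hr, beq_iff_eq, PySem.List.sorted_id_eq_sorted_id_iff_perm,
      List.perm_iff_count]
    constructor
    · intro h
      refine ⟨hr, fun c => ?_⟩
      have := h c
      rw [List.count_append] at this
      exact_mod_cast this
    · intro h c
      have := h.2 c
      rw [List.count_append]
      exact_mod_cast this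

-- A = true  iff  the same condition
theorem a_true_iff (fodder remove answer_key : String) :
    deletion_derives_answer_py fodder remove answer_key = true ↔
      (remove.toList ≠ [] ∧ ∀ c : Char,
        (fodder.toList.count c : Int) = remove.toList.count c + answer_key.toList.count c) := by
  unfold deletion_derives_answer_py
  by_cases hr : remove.toList = []
  · simp [hr]
  rw [if_neg hr]
  set F := fodder.toList with hF
  set R := remove.toList with hR
  set A := answer_key.toList with hA
  have hitems : (PySem.Dict.counter R).items
      = (PySem.Set.ofList R).map (fun k => (k, (R.count k : Int))) := PySem.Dict.items_counter R
  have hnodR : (((PySem.Dict.counter R).items).map Prod.fst).Nodup := by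
    rw [hitems, List.map_map]
    have he : Prod.fst ∘ (fun k : Char => (k, (R.count k : Int))) = id := rfl
    rw [he, List.map_id]
    exact PySem.Set.nodup_ofList R
  by_cases hdef : ∃ k ∈ R, (F.count k : Int) < R.count k
  · -- deficit: the loop returns None → A is false; and the counts cannot add up
    have hnone : pvLoopA (PySem.Dict.counter F) (PySem.Dict.counter R).items = none := by
      rw [loop_none_iff _ _ hnodR]
      obtain ⟨k, hk, hlt⟩ := hdef
      refine ⟨(k, (R.count k : Int)), ?_, ?_⟩
      · rw [hitems]
        exact List.mem_map_of_mem ((PySem.Set.mem_ofList R k).mpr hk)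
      · simpa [PySem.Dict.getD_counter] using hlt
    rw [hnone]
    simp only [Bool.false_eq_true, false_iff, not_and]
    intro _ hall
    obtain ⟨k, hk, hlt⟩ := hdef
    have h1 := hall k
    have h2 : (0 : Int) ≤ A.count k := by positivity
    omega
  · -- no deficit: the loop succeeds and leaves count_F − count_R everywhere
    push Not at hdef
    have hle : ∀ k : Char, (R.count k : Int) ≤ F.count k := by
      intro k
      by_cases hk : k ∈ R
      · exact hdef k hk
      · rw [List.count_eq_zero.mpr hk]; positivity
    have hnotnone : pvLoopA (PySem.Dict.counter F) (PySem.Dict.counter R).items ≠ none := by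
      intro hn
      rw [loop_none_iff _ _ hnodR, hitems] at hn
      obtain ⟨p, hp, hlt⟩ := hn
      simp only [List.mem_map] at hp
      obtain ⟨k, hk, rfl⟩ := hp
      rw [PySem.Dict.getD_counter] at hlt
      exact absurd hlt (not_lt.mpr (hle k))
    obtain ⟨d, hd⟩ := Option.ne_none_iff_exists'.mp hnotnone
    rw [hd]
    have hgetD : ∀ x, d.getD x 0 = (F.count x : Int) - R.count x := by
      intro x
      rw [loop_some_getD _ _ _ hnodR hd x, hitems, PySem.Dict.getD_counter, List.filter_map]
      have hc : (PySem.Set.ofList R).filter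
            ((fun p : Char × Int => p.1 == x) ∘ (fun k => (k, (R.count k : Int))))
          = (PySem.Set.ofList R).filter (fun y => y == x) := by
        apply List.filter_congr; intro y _; rfl
      rw [hc, filter_beq_of_nodup _ (PySem.Set.nodup_ofList R) x]
      by_cases hx : x ∈ R
      · simp [(PySem.Set.mem_ofList R x).mpr hx]
      · rw [if_neg (fun hcon => hx ((PySem.Set.mem_ofList R x).mp hcon))]
        simp [List.count_eq_zero.mpr hx]
    have hkeysd : ∀ x, x ∈ d.keys ↔ x ∈ F ∨ x ∈ R := by
      intro x
      rw [loop_some_mem_keys _ _ _ hd x, PySem.Dict.keys_counter, hitems, List.map_map]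
      have he : Prod.fst ∘ (fun k : Char => (k, (R.count k : Int))) = id := rfl
      rw [he, List.map_id, PySem.Set.mem_ofList, PySem.Set.mem_ofList]
    have hnodd : d.keys.Nodup := loop_some_nodup _ _ _ hd (PySem.Dict.nodup_keys_counter F)
    have hitemsd : d.items = d.keys.map (fun k => (k, d.getD k 0)) :=
      PySem.Dict.items_eq_map_keys d hnodd 0
    -- the rebuilt dict
    set fl := d.items.filter (fun p => decide (0 < p.2)) with hfl
    have hflsub : List.Sublist (fl.map Prod.fst) (d.items.map Prod.fst) :=
      List.Sublist.map Prod.fst List.filter_sublist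
    have hkeys_eq : d.items.map Prod.fst = d.keys := rfl
    have hflnd : (fl.map Prod.fst).Nodup := (hkeys_eq ▸ hnodd).sublist hflsub
    have hmem_fl : ∀ p : Char × Int, p ∈ fl ↔ p.1 ∈ d.keys ∧ 0 < d.getD p.1 0 ∧ p.2 = d.getD p.1 0 := by
      intro p
      rw [hfl, List.mem_filter, hitemsd, List.mem_map]
      constructor
      · rintro ⟨⟨k, hk, rfl⟩, hpos⟩
        exact ⟨hk, by simpa using hpos, rfl⟩
      · rintro ⟨hk, hpos, hv⟩
        obtain ⟨x, y⟩ := p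
        simp only at hv; subst hv
        exact ⟨⟨x, hk, rfl⟩, by simpa using hpos⟩
    have hreb_items : (PySem.Dict.ofList fl).items = fl := by
      have := PySem.Dict.items_foldl_insert_fresh fl (k := Prod.fst) (v := Prod.snd)
        (d := PySem.Dict.empty) (by intro a _; exact PySem.Dict.contains_empty _) hflnd
      simpa using this
    have hreb_keys : (PySem.Dict.ofList fl).keys = fl.map Prod.fst := by
      have h0 : (PySem.Dict.ofList fl).keys = ((PySem.Dict.ofList fl).items).map Prod.fst := rfl
      rw [h0, hreb_items]
    have hreb_nodup : (PySem.Dict.ofList fl).keys.Nodup := by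
      rw [hreb_keys]; exact hflnd
    have hreb_getD : ∀ x, (PySem.Dict.ofList fl).getD x 0 =
        if x ∈ d.keys ∧ 0 < d.getD x 0 then d.getD x 0 else 0 := by
      intro x
      by_cases hx : x ∈ d.keys ∧ 0 < d.getD x 0
      · rw [if_pos hx]
        exact PySem.Dict.getD_of_mem_items _ (hreb_items.symm ▸ (hmem_fl (x, d.getD x 0)).mpr
          ⟨hx.1, hx.2, rfl⟩) hreb_nodup 0
      · rw [if_neg hx]
        apply PySem.Dict.getD_of_not_contains
        rw [← Bool.not_eq_true, PySem.Dict.contains_iff_mem_keys]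
        intro hmem
        have : x ∈ fl.map Prod.fst := by rwa [hreb_keys] at hmem
        obtain ⟨p, hp, rfl⟩ := List.mem_map.mp this
        have := (hmem_fl p).mp hp
        exact hx ⟨this.1, this.2.1⟩
    -- characterize the final Counter equality
    rw [show (pvCounterEq (PySem.Dict.ofList fl) (PySem.Dict.counter A) = true) ↔
        ((∀ p ∈ (PySem.Dict.ofList fl).items, (PySem.Dict.counter A).getD p.1 0 = p.2) ∧
         (∀ p ∈ (PySem.Dict.counter A).items, (PySem.Dict.ofList fl).getD p.1 0 = p.2)) from by
      simp [pvCounterEq, List.all_eq_true]]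
    rw [hreb_items, PySem.Dict.items_counter A]
    constructor
    · rintro ⟨C1, C2⟩
      refine ⟨hr, fun c => ?_⟩
      have hgc := hgetD c
      by_cases hck : c ∈ d.keys
      · by_cases hpos : 0 < d.getD c 0
        · have h1 := C1 (c, d.getD c 0) ((hmem_fl _).mpr ⟨hck, hpos, rfl⟩)
          rw [PySem.Dict.getD_counter] at h1
          simp only at h1
          omega
        · by_cases hca : c ∈ A
          · have h2 := C2 (c, (A.count c : Int))
              (List.mem_map_of_mem ((PySem.Set.mem_ofList A c).mpr hca))
            simp only [hreb_getD,
              if_neg (fun hcon : c ∈ d.keys ∧ 0 < d.getD c 0 => hpos hcon.2)] at h2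
            have : 0 < A.count c := List.count_pos_iff.mpr hca
            omega
          · have hz : A.count c = 0 := List.count_eq_zero.mpr hca
            have hlec := hle c
            have hpos' : ¬ (0 : Int) < (F.count c : Int) - R.count c := by rwa [hgc] at hpos
            omega
      · have hcf : c ∉ F := fun hc => hck ((hkeysd c).mpr (Or.inl hc))
        have hcr : c ∉ R := fun hc => hck ((hkeysd c).mpr (Or.inr hc))
        have hcaz : A.count c = 0 := by
          by_contra hne
          have hca : c ∈ A := by
            rcases List.count_pos_iff.mp (Nat.pos_of_ne_zero hne) with h; exact h
          have h2 := C2 (c, (A.count c : Int))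
            (List.mem_map_of_mem ((PySem.Set.mem_ofList A c).mpr hca))
          simp only [hreb_getD,
            if_neg (fun hcon : c ∈ d.keys ∧ 0 < d.getD c 0 => hck hcon.1)] at h2
          have : 0 < A.count c := List.count_pos_iff.mpr hca
          omega
        rw [List.count_eq_zero.mpr hcf, List.count_eq_zero.mpr hcr, hcaz]
        simp
    · rintro ⟨_, hQ⟩
      constructor
      · rintro p hp
        obtain ⟨hk, hpos, hv⟩ := (hmem_fl p).mp hp
        rw [PySem.Dict.getD_counter, hv, hgetD]
        have := hQ p.1
        omega
      · rintro p hp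
        obtain ⟨k, hk, rfl⟩ := List.mem_map.mp hp
        have hka : k ∈ A := (PySem.Set.mem_ofList A k).mp hk
        have hkc : 0 < A.count k := List.count_pos_iff.mpr hka
        have hQk := hQ k
        have hkF : k ∈ F := by
          apply List.count_pos_iff.mp
          have := hle k
          omega
        simp only [hreb_getD, hgetD]
        rw [if_pos ⟨(hkeysd k).mpr (Or.inl hkF), by omega⟩]
        omega

-- ===== VERDICT (by name: the statement is the Claim_ definition above) =====
theorem deletion_derives_answer_py_spec : Claim_equal_deletion_derives_answer_py := by
  intro fodder remove answer_key _
  unfold Spec_deletion_derives_answer_py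
  exact Bool.eq_iff_iff.mpr
    ⟨fun h => (alt_true_iff fodder remove answer_key).mpr
        ((a_true_iff fodder remove answer_key).mp h),
      fun h => (a_true_iff fodder remove answer_key).mpr
        ((alt_true_iff fodder remove answer_key).mp h)⟩
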